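-- pv_equiv track=rewrite | github.com/sukhada-sukhada/lc4eu | USR-to-hindi/common.py | add_construction
-- ===== SOURCE A (Python) =====
-- def add_construction(transformed_data, construction_dict):
--     Constructdata = []
--
--     for data in transformed_data:
--         index = data[0]
--         if index in construction_dict:
--             temp = list(data)
--             term = construction_dict[index]
--             for t in term:
--                 tag = t[0]
--                 val = t[1]
--                 if tag == 'before':
--                     temp[1] = val + ' ' + temp[1]
--                 else:
--                     if val == ',':
--                         temp[1] = temp[1] + val
--                     else:
--                         temp[1] = temp[1] + ' ' +val
--             data = tuple(temp)
--         Constructdata.append(data)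
--
--     return Constructdata
-- ===== SOURCE B (Python) =====
-- def _rebuild(index, value, term):
--     befores = [v for t, v in term if t == 'before']
--     afters = [v for t, v in term if t != 'before']
--     prefix = (' '.join(reversed(befores)) + ' ') if befores else ''
--     suffix = ''.join(v if v == ',' else ' ' + v for v in afters)
--     return (index, prefix + value + suffix)
--
--
-- def add_construction(transformed_data, construction_dict):
--     return [
--         data if (term := construction_dict.get(data[0])) is None
--         else _rebuild(data[0], data[1], term)
--         for data in transformed_data
--     ]
-- ===== Notes on version B (the rewrite author's own statement) =====
-- stated objective: alternative
-- what changed: B replaces A's sequential string-mutation loop over the terms with a single partition into before/after values, building the prefix as one join of the reversed before-values and the suffix as one join of glued after-values, and maps a per-row helper over the data instead of accumulating with append.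
import Mathlib
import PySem

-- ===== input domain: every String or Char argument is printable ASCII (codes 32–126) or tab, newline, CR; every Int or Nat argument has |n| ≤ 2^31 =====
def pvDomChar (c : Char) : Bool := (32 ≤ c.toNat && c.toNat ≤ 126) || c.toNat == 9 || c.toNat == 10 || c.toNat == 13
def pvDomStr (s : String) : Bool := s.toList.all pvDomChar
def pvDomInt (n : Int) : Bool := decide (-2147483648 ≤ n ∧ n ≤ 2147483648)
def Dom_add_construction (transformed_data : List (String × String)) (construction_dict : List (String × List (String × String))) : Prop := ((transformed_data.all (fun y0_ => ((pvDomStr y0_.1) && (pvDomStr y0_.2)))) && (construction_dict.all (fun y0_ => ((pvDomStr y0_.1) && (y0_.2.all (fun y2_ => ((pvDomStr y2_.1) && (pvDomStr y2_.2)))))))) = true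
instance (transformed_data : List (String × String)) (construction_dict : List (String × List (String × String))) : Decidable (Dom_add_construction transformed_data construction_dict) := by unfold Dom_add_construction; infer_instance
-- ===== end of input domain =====

-- B replaces A's sequential per-term string-mutation loop with one partition of the terms into
-- before/after values and two joins per matched row; same values, no speed claim ('alternative').

-- ===== PORT A =====
-- literal transliteration of A: accumulate rows, on a dict hit fold the terms over temp[1]
def add_construction (transformed_data : List (String × String)) (construction_dict : List (String × List (String × String))) : List (String × String) :=
  transformed_data.foldl (fun Constructdata data =>
    match PySem.Dict.get? ⟨construction_dict⟩ data.1 with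
    | some term =>
        let temp1 := term.foldl (fun s t =>
          if t.1 == "before" then t.2 ++ " " ++ s
          else if t.2 == "," then s ++ t.2
          else s ++ " " ++ t.2) data.2
        Constructdata ++ [(data.1, temp1)]
    | none => Constructdata ++ [data]) []

-- ===== PORT B =====
-- helper _rebuild of Source B
def pvRebuild (index value : String) (term : List (String × String)) : String × String :=
  let befores := (term.filter (fun t => t.1 == "before")).map Prod.snd
  let afters := (term.filter (fun t => !(t.1 == "before"))).map Prod.snd
  let pfx := if befores.isEmpty then "" else PySem.Str.join " " befores.reverse ++ " "
  let sfx := PySem.Str.join "" (afters.map (fun v => if v == "," then v else " " ++ v))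
  (index, pfx ++ value ++ sfx)

def add_construction_alt (transformed_data : List (String × String)) (construction_dict : List (String × List (String × String))) : List (String × String) :=
  transformed_data.map (fun data =>
    match PySem.Dict.get? ⟨construction_dict⟩ data.1 with
    | none => data
    | some term => pvRebuild data.1 data.2 term)

-- ===== PRECONDITION & SPEC =====
def Spec_add_construction (transformed_data : List (String × String)) (construction_dict : List (String × List (String × String))) (out : List (String × String)) : Prop := out = add_construction_alt transformed_data construction_dict
instance (transformed_data : List (String × String)) (construction_dict : List (String × List (String × String))) (out : List (String × String)) : Decidable (Spec_add_construction transformed_data construction_dict out) := by unfold Spec_add_construction; infer_instance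

-- ===== CLAIM (what is proved, stated in full; the proofs are below) =====
def Claim_equal_add_construction : Prop := ∀ (transformed_data : List (String × String)) (construction_dict : List (String × List (String × String))), Dom_add_construction transformed_data construction_dict → Spec_add_construction transformed_data construction_dict (add_construction transformed_data construction_dict)

-- ===== LEMMAS AND PROOFS =====

-- A's per-term step and the two fold summaries used in the proof
def pvStepA (s : String) (t : String × String) : String :=
  if t.1 == "before" then t.2 ++ " " ++ s
  else if t.2 == "," then s ++ t.2
  else s ++ " " ++ t.2

def pvGlue (v : String) : String := if v == "," then v else " " ++ v

def pvStrcat (l : List String) : String := l.foldr (· ++ ·) ""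

lemma pvStrcat_nil : pvStrcat [] = "" := rfl

lemma pvStrcat_cons (x : String) (l : List String) : pvStrcat (x :: l) = x ++ pvStrcat l := rfl

lemma pvStrcat_append (a b : List String) : pvStrcat (a ++ b) = pvStrcat a ++ pvStrcat b := by
  induction a with
  | nil => simp [pvStrcat_nil, String.empty_append]
  | cons x xs ih => simp [pvStrcat_cons, ih, String.append_assoc]

-- String-level restatements of the Chars join lemmas
lemma pvJoin_nil (sep : String) : PySem.Str.join sep [] = "" := by
  simp [PySem.Str.join, PySem.Chars.join_nil]

lemma pvJoin_singleton (sep p : String) : PySem.Str.join sep [p] = p := by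
  simp [PySem.Str.join, PySem.Chars.join_singleton, String.ofList_toList]

lemma pvJoin_cons_cons (sep p q : String) (rest : List String) :
    PySem.Str.join sep (p :: q :: rest) = p ++ sep ++ PySem.Str.join sep (q :: rest) := by
  simp [PySem.Str.join, PySem.Chars.join_cons_cons, String.ofList_append, String.ofList_toList,
    String.append_assoc]

lemma pvJoin_empty_sep (l : List String) : PySem.Str.join "" l = pvStrcat l := by
  induction l with
  | nil => simp [pvJoin_nil, pvStrcat_nil]
  | cons x r ih =>
    cases r with
    | nil => simp [pvJoin_singleton, pvStrcat_cons, pvStrcat_nil, String.append_empty]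
    | cons y r' =>
      rw [pvJoin_cons_cons, ih, pvStrcat_cons, String.append_empty]
      simp [pvStrcat_cons]

lemma pvJoin_space (l : List String) (h : l ≠ []) :
    PySem.Str.join " " l ++ " " = pvStrcat (l.map (fun v => v ++ " ")) := by
  induction l with
  | nil => exact absurd rfl h
  | cons x r ih =>
    cases r with
    | nil =>
      simp [pvJoin_singleton, pvStrcat_cons, pvStrcat_nil, String.append_empty]
    | cons y r' =>
      rw [pvJoin_cons_cons, List.map_cons, pvStrcat_cons, ← ih (by simp)]
      simp [String.append_assoc]

-- the interleaved fold of A equals prefix ++ s ++ suffix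
lemma pvFoldA_eq (ts : List (String × String)) : ∀ s : String,
    ts.foldl pvStepA s =
      pvStrcat (((ts.filter (fun t => t.1 == "before")).map (fun t => t.2 ++ " ")).reverse)
        ++ s ++ pvStrcat ((ts.filter (fun t => !(t.1 == "before"))).map (fun t => pvGlue t.2)) := by
  induction ts with
  | nil => intro s; simp [pvStrcat_nil, String.empty_append, String.append_empty]
  | cons t ts ih =>
    intro s
    by_cases h : t.1 == "before"
    · rw [List.foldl_cons, ih]
      simp only [List.filter_cons, h, Bool.not_true, if_pos]
      simp [pvStepA, h, pvStrcat_append, pvStrcat_cons, pvStrcat_nil,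
        String.append_empty, String.append_assoc]
    · rw [List.foldl_cons, ih]
      simp only [List.filter_cons, h, Bool.not_false]
      have : pvStepA s t = s ++ pvGlue t.2 := by
        simp [pvStepA, pvGlue, h]
        split <;> simp [String.append_assoc]
      simp [this, pvStrcat_cons, String.append_assoc]

-- per-row agreement on a matched row
lemma pvRow_eq (index value : String) (term : List (String × String)) :
    (index, term.foldl pvStepA value) = pvRebuild index value term := by
  unfold pvRebuild
  rw [pvFoldA_eq]
  simp only [Prod.mk.injEq, true_and]
  by_cases hb : (term.filter (fun t => t.1 == "before")).map Prod.snd = []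
  · have hb' : term.filter (fun t => t.1 == "before") = [] := List.map_eq_nil_iff.mp hb
    simp [hb', pvJoin_empty_sep, pvGlue, Function.comp_def, pvStrcat_nil, String.empty_append]
  · have hne : ((term.filter (fun t => t.1 == "before")).map Prod.snd).reverse ≠ [] := by
      simpa using hb
    rw [if_neg (by simpa [List.isEmpty_iff] using hb)]
    rw [pvJoin_space _ hne, pvJoin_empty_sep]
    simp [List.map_reverse, List.map_map, Function.comp_def, pvGlue, String.append_assoc]

-- A's body written as append of one row
def pvRowA (construction_dict : List (String × List (String × String))) (data : String × String) : String × String :=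
  match PySem.Dict.get? ⟨construction_dict⟩ data.1 with
  | some term => (data.1, term.foldl pvStepA data.2)
  | none => data

lemma pvA_foldl (construction_dict : List (String × List (String × String))) (td : List (String × String)) :
    ∀ acc : List (String × String),
      td.foldl (fun Constructdata data =>
        match PySem.Dict.get? ⟨construction_dict⟩ data.1 with
        | some term =>
            let temp1 := term.foldl (fun s t =>
              if t.1 == "before" then t.2 ++ " " ++ s
              else if t.2 == "," then s ++ t.2
              else s ++ " " ++ t.2) data.2
            Constructdata ++ [(data.1, temp1)]
        | none => Constructdata ++ [data]) acc
      = acc ++ td.map (pvRowA construction_dict) := by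
  induction td with
  | nil => intro acc; simp
  | cons d td ih =>
    intro acc
    rw [List.foldl_cons, List.map_cons, ih]
    have : (match PySem.Dict.get? ⟨construction_dict⟩ d.1 with
        | some term =>
            let temp1 := term.foldl (fun s t =>
              if t.1 == "before" then t.2 ++ " " ++ s
              else if t.2 == "," then s ++ t.2
              else s ++ " " ++ t.2) d.2
            acc ++ [(d.1, temp1)]
        | none => acc ++ [d]) = acc ++ [pvRowA construction_dict d] := by
      unfold pvRowA
      cases PySem.Dict.get? ⟨construction_dict⟩ d.1 with
      | none => rfl
      | some term => rfl
    rw [this]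
    simp

-- ===== VERDICT (by name: the statement is the Claim_ definition above) =====
theorem add_construction_spec : Claim_equal_add_construction := by
  intro transformed_data construction_dict _
  unfold Spec_add_construction add_construction add_construction_alt
  rw [pvA_foldl construction_dict transformed_data []]
  simp only [List.nil_append]
  apply List.map_congr_left
  intro d _
  unfold pvRowA
  cases PySem.Dict.get? ⟨construction_dict⟩ d.1 with
  | none => rfl
  | some term => exact pvRow_eq d.1 d.2 term
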